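-- pv_equiv track=rewrite | github.com/Codemo-0522/FishEternal | backend/app/utils/document_parsers/text_parser.py | _extract_markdown_metadata
-- ===== SOURCE A (Python) =====
-- from typing import List, Dict, Any
--
-- def _extract_markdown_metadata(text: str) -> Dict[str, Any]:
--     """提取Markdown文件元数据"""
--     lines = text.splitlines()
--     headers = [line for line in lines if line.strip().startswith('#')]
--
--     return {
--         "markdown_headers": len(headers),
--         "markdown_h1_count": len([h for h in headers if h.strip().startswith('# ')]),
--         "markdown_h2_count": len([h for h in headers if h.strip().startswith('## ')]),
--         "markdown_links": text.count(']('),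
--         "markdown_images": text.count('![')
--     }
-- ===== SOURCE B (Python) =====
-- def _extract_markdown_metadata(text: str):
--     """提取Markdown文件元数据"""
--     # One character-level scan with a per-line state machine instead of
--     # splitlines + strip + startswith filtering.
--     headers = h1 = h2 = 0
--     # state: 0 = at line start (skipping leading blanks), 1 = inside leading '#' run,
--     #        2 = saw ' ' right after a run of <= 2 '#' (awaiting a non-blank to confirm),
--     #        3 = line known to be a header (classification finished),
--     #        4 = line known not to be a header
--     state = 0
--     hashes = 0
--     for c in text:
--         if c == '\n' or c == '\r':
--             if state == 1 or state == 2 or state == 3: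
--                 headers += 1
--             state = 0
--             hashes = 0
--         elif state == 0:
--             if c == '#':
--                 state = 1
--                 hashes = 1
--             elif c != ' ' and c != '\t':
--                 state = 4
--         elif state == 1:
--             if c == '#':
--                 hashes += 1
--             elif c == ' ' and hashes <= 2:
--                 state = 2
--             else:
--                 state = 3
--         elif state == 2:
--             if c != ' ' and c != '\t':
--                 if hashes == 1:
--                     h1 += 1
--                 else:
--                     h2 += 1
--                 state = 3
--     if state == 1 or state == 2 or state == 3:
--         headers += 1
--     return {
--         "markdown_headers": headers,
--         "markdown_h1_count": h1,
--         "markdown_h2_count": h2,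
--         "markdown_links": text.count(']('),
--         "markdown_images": text.count('![')
--     }
-- ===== Notes on version B (the rewrite author's own statement) =====
-- stated objective: alternative
-- what changed: Replaces splitlines + strip + three startswith-filter passes with a single character-level scan driven by a five-state per-line automaton that classifies each line incrementally and never materialises the line list or stripped strings.
import Mathlib
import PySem

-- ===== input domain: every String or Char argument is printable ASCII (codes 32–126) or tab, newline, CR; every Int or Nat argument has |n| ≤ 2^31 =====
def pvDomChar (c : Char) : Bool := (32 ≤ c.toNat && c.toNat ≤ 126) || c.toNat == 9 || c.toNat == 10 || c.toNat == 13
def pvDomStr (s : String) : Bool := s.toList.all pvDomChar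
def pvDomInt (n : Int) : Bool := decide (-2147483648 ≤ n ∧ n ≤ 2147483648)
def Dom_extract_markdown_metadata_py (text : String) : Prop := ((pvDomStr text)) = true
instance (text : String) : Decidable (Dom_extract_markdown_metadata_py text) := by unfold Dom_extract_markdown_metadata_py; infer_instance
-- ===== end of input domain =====

-- B replaces A's splitlines + strip + startswith filter passes with a single
-- character-level scan driven by a per-line state machine; same return value on Dom.

-- ===== PORT A =====
def extract_markdown_metadata_py (text : String) : List (String × Int) :=
  let lines := PySem.Str.splitlines text
  let headers := lines.filter (fun line => PySem.Str.startswith (PySem.Str.strip line) "#")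
  [("markdown_headers", (headers.length : Int)),
   ("markdown_h1_count", ((headers.filter (fun h => PySem.Str.startswith (PySem.Str.strip h) "# ")).length : Int)),
   ("markdown_h2_count", ((headers.filter (fun h => PySem.Str.startswith (PySem.Str.strip h) "## ")).length : Int)),
   ("markdown_links", (PySem.Str.count text "](" : Int)),
   ("markdown_images", (PySem.Str.count text "![" : Int))]

-- ===== PORT B =====
-- loop state of Source B: the three counters plus the per-line automaton state
structure MSt where
  headers : Int
  h1 : Int
  h2 : Int
  st : Nat      -- 0 line start, 1 leading '#' run, 2 run-then-space pending, 3 header classified, 4 not a header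
  hashes : Nat
deriving Repr, DecidableEq

def pvStep (m : MSt) (c : Char) : MSt :=
  if c = '\n' ∨ c = '\r' then
    if m.st = 1 ∨ m.st = 2 ∨ m.st = 3 then
      { m with headers := m.headers + 1, st := 0, hashes := 0 }
    else { m with st := 0, hashes := 0 }
  else if m.st = 0 then
    if c = '#' then { m with st := 1, hashes := 1 }
    else if c ≠ ' ' ∧ c ≠ '\t' then { m with st := 4 }
    else m
  else if m.st = 1 then
    if c = '#' then { m with hashes := m.hashes + 1 }
    else if c = ' ' ∧ m.hashes ≤ 2 then { m with st := 2 }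
    else { m with st := 3 }
  else if m.st = 2 then
    if c ≠ ' ' ∧ c ≠ '\t' then
      if m.hashes = 1 then { m with st := 3, h1 := m.h1 + 1 }
      else { m with st := 3, h2 := m.h2 + 1 }
    else m
  else m

def extract_markdown_metadata_py_alt (text : String) : List (String × Int) :=
  let m := text.toList.foldl pvStep ⟨0, 0, 0, 0, 0⟩
  let headers := if m.st = 1 ∨ m.st = 2 ∨ m.st = 3 then m.headers + 1 else m.headers
  [("markdown_headers", headers),
   ("markdown_h1_count", m.h1),
   ("markdown_h2_count", m.h2),
   ("markdown_links", (PySem.Str.count text "](" : Int)),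
   ("markdown_images", (PySem.Str.count text "![" : Int))]

-- ===== PRECONDITION & SPEC =====
def Spec_extract_markdown_metadata_py (text : String) (out : List (String × Int)) : Prop := out = extract_markdown_metadata_py_alt text
instance (text : String) (out : List (String × Int)) : Decidable (Spec_extract_markdown_metadata_py text out) := by unfold Spec_extract_markdown_metadata_py; infer_instance

-- ===== CLAIM (what is proved, stated in full; the proofs are below) =====
def Claim_equal_extract_markdown_metadata_py : Prop := ∀ (text : String), Dom_extract_markdown_metadata_py text → Spec_extract_markdown_metadata_py text (extract_markdown_metadata_py text)

-- ===== LEMMAS AND PROOFS =====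

-- proof-side abbreviations and per-line specifications
def pvBrk (c : Char) : Bool := c == '\n' || c == '\r'
def pvWs (c : Char) : Bool := c == ' ' || c == '\t'
def pvIsB (c : Char) : Bool :=
  have n := c.toNat
  decide (n = 10) || decide (n = 13) || decide (n = 11) || decide (n = 12) || decide (n = 28) || decide (n = 29) ||
    decide (n = 30) || decide (n = 133) || decide (n = 8232) || decide (n = 8233)
def pvHdrB (l : List Char) : Bool := (l.dropWhile pvWs).head? == some '#'
def pvH1B (l : List Char) : Bool :=
  (l.dropWhile pvWs).head? == some '#' && (l.dropWhile pvWs)[1]? == some ' ' &&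
    ((l.dropWhile pvWs).drop 2).any (fun c => !pvWs c)
def pvH2B (l : List Char) : Bool :=
  (l.dropWhile pvWs).head? == some '#' && (l.dropWhile pvWs)[1]? == some '#' &&
    (l.dropWhile pvWs)[2]? == some ' ' && ((l.dropWhile pvWs).drop 3).any (fun c => !pvWs c)
def pvAH (l : List Char) : Bool := PySem.Chars.startswith (PySem.Chars.strip l) ['#']
def pvA1 (l : List Char) : Bool := PySem.Chars.startswith (PySem.Chars.strip l) ['#', ' ']
def pvA2 (l : List Char) : Bool := PySem.Chars.startswith (PySem.Chars.strip l) ['#', '#', ' ']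

lemma char_eq_iff_toNat (c d : Char) : c = d ↔ c.toNat = d.toNat := by
  constructor
  · rintro rfl; rfl
  · intro h; exact Char.ext (by exact_mod_cast UInt32.toNat_inj.mp h)

lemma char_beq_toNat (c d : Char) : (c == d) = decide (c.toNat = d.toNat) := by
  rw [Bool.eq_iff_iff]; simp [char_eq_iff_toNat]

lemma dom_isB (c : Char) (h : pvDomChar c = true) : pvIsB c = pvBrk c := by
  simp [pvDomChar] at h
  simp only [pvIsB, pvBrk, char_beq_toNat]
  rw [Bool.eq_iff_iff]
  simp only [Bool.or_eq_true, decide_eq_true_eq]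
  simp only [show ('\n').toNat = 10 from rfl, show ('\r').toNat = 13 from rfl, show (' ').toNat = 32 from rfl, show ('\t').toNat = 9 from rfl] at *
  constructor <;> intro hx <;> omega

lemma dom_isspace (c : Char) (h : pvDomChar c = true) (hb : pvBrk c = false) :
    PySem.Chars.isspace c = pvWs c := by
  simp [pvDomChar] at h
  simp only [pvBrk, char_beq_toNat, Bool.or_eq_false_iff, decide_eq_false_iff_not] at hb
  simp only [PySem.Chars.isspace, pvWs, char_beq_toNat]
  rw [Bool.eq_iff_iff]
  simp only [Bool.or_eq_true, Bool.and_eq_true, decide_eq_true_eq]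
  simp only [show ('\n').toNat = 10 from rfl, show ('\r').toNat = 13 from rfl, show (' ').toNat = 32 from rfl, show ('\t').toNat = 9 from rfl] at *
  constructor <;> intro hx <;> omega

lemma go_nil (cur acc) : PySem.Chars.splitlines.go pvIsB [] cur acc =
    if cur.isEmpty then acc.reverse else (cur.reverse :: acc).reverse := by
  simp [PySem.Chars.splitlines.go]

lemma go_rn (rest cur acc) : PySem.Chars.splitlines.go pvIsB ('\r'::'\n'::rest) cur acc =
    PySem.Chars.splitlines.go pvIsB rest [] (cur.reverse :: acc) := by
  simp [PySem.Chars.splitlines.go]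

lemma go_n (rest cur acc) : PySem.Chars.splitlines.go pvIsB ('\n'::rest) cur acc =
    PySem.Chars.splitlines.go pvIsB rest [] (cur.reverse :: acc) := by
  simp [PySem.Chars.splitlines.go, pvIsB]

lemma go_r (rest cur acc) (h : ∀ r', rest ≠ '\n' :: r') :
    PySem.Chars.splitlines.go pvIsB ('\r'::rest) cur acc =
    PySem.Chars.splitlines.go pvIsB rest [] (cur.reverse :: acc) := by
  match rest with
  | [] => simp [PySem.Chars.splitlines.go, pvIsB]
  | c :: r' =>
    have : c ≠ '\n' := fun hc => h r' (by rw [hc])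
    rw [PySem.Chars.splitlines.go.eq_def]
    split
    · simp_all
    · rename_i heq
      injection heq with h1 h2
      injection h2 with h3 _
      exact absurd h3 this
    · rename_i _ heq
      injection heq with h1 h2
      subst h1; subst h2
      rw [if_pos (by decide)]

lemma go_cons (c : Char) (rest cur acc) (hc : pvIsB c = false) :
    PySem.Chars.splitlines.go pvIsB (c::rest) cur acc =
    PySem.Chars.splitlines.go pvIsB rest (c :: cur) acc := by
  have hr : c ≠ '\r' := by
    rintro rfl; simp [pvIsB] at hc
  rw [PySem.Chars.splitlines.go.eq_def]
  split
  · simp_all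
  · rename_i heq
    injection heq with h1 _
    exact absurd h1 hr
  · rename_i _ heq
    injection heq with h1 h2
    subst h1; subst h2
    rw [if_neg (by simp [hc])]

lemma splitlines_eq_go (s : List Char) :
    PySem.Chars.splitlines s = PySem.Chars.splitlines.go pvIsB s [] [] := rfl

lemma go_brkc (c : Char) (rest cur acc) (hc : pvIsB c = true) (hr : c ≠ '\r') :
    PySem.Chars.splitlines.go pvIsB (c::rest) cur acc =
    PySem.Chars.splitlines.go pvIsB rest [] (cur.reverse :: acc) := by
  rw [PySem.Chars.splitlines.go.eq_def]
  split
  · simp_all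
  · rename_i heq
    injection heq with h1 _
    exact absurd h1 hr
  · rename_i _ heq
    injection heq with h1 h2
    subst h1; subst h2
    rw [if_pos hc]

lemma go_consume (t : List Char) (ht : ∀ c ∈ t, pvIsB c = false) (rest cur acc) :
    PySem.Chars.splitlines.go pvIsB (t ++ rest) cur acc =
    PySem.Chars.splitlines.go pvIsB rest (t.reverse ++ cur) acc := by
  induction t generalizing cur with
  | nil => simp
  | cons c t' ih =>
    rw [List.cons_append, go_cons c _ _ _ (ht c List.mem_cons_self), ih (fun x hx => ht x (List.mem_cons_of_mem _ hx))]
    simp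

lemma go_acc (n : Nat) (s : List Char) (hn : s.length ≤ n) (cur : List Char) (acc : List (List Char)) :
    PySem.Chars.splitlines.go pvIsB s cur acc =
    acc.reverse ++ PySem.Chars.splitlines.go pvIsB s cur [] := by
  induction n generalizing s cur acc with
  | zero =>
    have : s = [] := List.length_eq_zero_iff.mp (Nat.le_zero.mp hn)
    subst this
    simp [go_nil]
    split <;> simp
  | succ n ih =>
    match s with
    | [] => simp [go_nil]; split <;> simp
    | '\r' :: '\n' :: rest =>
      rw [go_rn, go_rn, ih rest (by simp at hn ⊢; omega), ih rest (by simp at hn ⊢; omega) _ [cur.reverse]]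
      simp
    | c :: rest =>
      by_cases hc : pvIsB c = true
      · by_cases hr : c = '\r'
        · subst hr
          match rest with
          | '\n' :: rest2 =>
            rw [go_rn, go_rn, ih rest2 (by simp at hn ⊢; omega), ih rest2 (by simp at hn ⊢; omega) _ [cur.reverse]]
            simp
          | [] =>
            rw [go_r _ _ _ (by intro r' h; cases h), go_r _ _ _ (by intro r' h; cases h),
              ih [] (by simp) _ _, ih [] (by simp) _ [cur.reverse]]
            simp
          | c2 :: rest2 =>
            by_cases h2 : c2 = '\n'
            · subst h2
              rw [go_rn, go_rn, ih rest2 (by simp at hn ⊢; omega), ih rest2 (by simp at hn ⊢; omega) _ [cur.reverse]]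
              simp
            · rw [go_r _ _ _ (by intro r' h; injection h with h1 _; exact h2 h1),
                go_r _ _ _ (by intro r' h; injection h with h1 _; exact h2 h1),
                ih (c2 :: rest2) (by simp at hn ⊢; omega), ih (c2 :: rest2) (by simp at hn ⊢; omega) _ [cur.reverse]]
              simp
        · rw [go_brkc c _ _ _ hc hr, go_brkc c _ _ _ hc hr,
            ih rest (by simp at hn ⊢; omega), ih rest (by simp at hn ⊢; omega) _ [cur.reverse]]
          simp
      · rw [go_cons c _ _ _ (by simp at hc; simp [hc]), go_cons c _ _ _ (by simp at hc; simp [hc]),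
          ih rest (by simp at hn ⊢; omega), ih rest (by simp at hn ⊢; omega)]

lemma brk_ne (c : Char) (h : pvBrk c = false) : ¬(c = '\n' ∨ c = '\r') := by
  simp [pvBrk] at h; simp [h]

lemma ws_ne (c : Char) (h : pvWs c = false) : c ≠ ' ' ∧ c ≠ '\t' := by
  simp [pvWs] at h; simp [h]

lemma L_inert (l : List Char) (m : MSt) (hl : ∀ c ∈ l, pvBrk c = false)
    (hst : m.st = 3 ∨ m.st = 4) : l.foldl pvStep m = m := by
  induction l with
  | nil => rfl
  | cons c t ih =>
    have hc := brk_ne c (hl c List.mem_cons_self)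
    have hstep : pvStep m c = m := by
      rcases hst with h | h <;> simp [pvStep, hc, h]
    rw [List.foldl_cons, hstep, ih (fun x hx => hl x (List.mem_cons_of_mem _ hx))]

lemma L_pending (l : List Char) (m : MSt) (hl : ∀ c ∈ l, pvBrk c = false) (hst : m.st = 2) :
    l.foldl pvStep m =
      if l.any (fun c => !pvWs c) then
        { m with st := 3, h1 := m.h1 + (if m.hashes = 1 then 1 else 0), h2 := m.h2 + (if m.hashes = 1 then 0 else 1) }
      else m := by
  induction l with
  | nil => simp
  | cons c t ih =>
    have hc := brk_ne c (hl c List.mem_cons_self)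
    have ht : ∀ x ∈ t, pvBrk x = false := fun x hx => hl x (List.mem_cons_of_mem _ hx)
    by_cases hw : pvWs c = true
    · have hws : ¬(c ≠ ' ' ∧ c ≠ '\t') := by simp [pvWs] at hw; rcases hw with h | h <;> simp [h]
      have hstep : pvStep m c = m := by simp [pvStep, hc, hst, hws]
      rw [List.foldl_cons, hstep, ih ht]
      simp [hw]
    · have hne := ws_ne c (by simpa using hw)
      by_cases h1 : m.hashes = 1
      · have hstep : pvStep m c = { m with st := 3, h1 := m.h1 + 1 } := by
          simp [pvStep, hc, hst, hne, h1]
        rw [List.foldl_cons, hstep, L_inert t _ ht (by simp)]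
        simp [hw, h1]
      · have hstep : pvStep m c = { m with st := 3, h2 := m.h2 + 1 } := by
          simp [pvStep, hc, hst, hne, h1]
        rw [List.foldl_cons, hstep, L_inert t _ ht (by simp)]
        simp [hw, h1]

lemma L_big (l : List Char) (m : MSt) (hl : ∀ c ∈ l, pvBrk c = false) (hst : m.st = 1)
    (hh : 3 ≤ m.hashes) :
    (l.foldl pvStep m).headers = m.headers ∧ (l.foldl pvStep m).h1 = m.h1 ∧
    (l.foldl pvStep m).h2 = m.h2 ∧ ((l.foldl pvStep m).st = 1 ∨ (l.foldl pvStep m).st = 3) := by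
  induction l generalizing m with
  | nil => simp [hst]
  | cons c t ih =>
    have hc := brk_ne c (hl c List.mem_cons_self)
    have ht : ∀ x ∈ t, pvBrk x = false := fun x hx => hl x (List.mem_cons_of_mem _ hx)
    by_cases hsh : c = '#'
    · have hstep : pvStep m c = { m with hashes := m.hashes + 1 } := by
        simp [pvStep, hc, hst, hsh]
      rw [List.foldl_cons, hstep]
      exact ih _ ht hst (by simp; omega)
    · have hstep : pvStep m c = { m with st := 3 } := by
        simp [pvStep, hc, hst, hsh]
        try omega
      rw [List.foldl_cons, hstep, L_inert t _ ht (by simp)]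
      simp

lemma L_ws0 (l : List Char) (m : MSt) (hl : ∀ c ∈ l, pvWs c = true) (hst : m.st = 0) :
    l.foldl pvStep m = m := by
  induction l with
  | nil => rfl
  | cons c t ih =>
    have hw := hl c List.mem_cons_self
    have hb : pvBrk c = false := by
      simp [pvWs] at hw; simp [pvBrk]; rcases hw with h | h <;> simp [h]
    have hc := brk_ne c hb
    have hsh : c ≠ '#' := by simp [pvWs] at hw; rcases hw with h | h <;> simp [h]
    have hws : ¬(c ≠ ' ' ∧ c ≠ '\t') := by simp [pvWs] at hw; rcases hw with h | h <;> simp [h]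
    have hstep : pvStep m c = m := by simp [pvStep, hc, hst, hsh, hws]
    rw [List.foldl_cons, hstep, ih (fun x hx => hl x (List.mem_cons_of_mem _ hx))]

lemma dropWhile_head_false {p : Char → Bool} {l r : List Char} {c : Char}
    (h : l.dropWhile p = c :: r) : p c = false := by
  induction l with
  | nil => cases h
  | cons a t ih =>
    rw [List.dropWhile_cons] at h
    split at h
    · exact ih h
    · injection h with h1 _
      subst h1; simp_all

lemma L_line (l : List Char) (hl : ∀ c ∈ l, pvBrk c = false) (H a b : Int) :
    (l.foldl pvStep ⟨H, a, b, 0, 0⟩).headers = H ∧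
    (l.foldl pvStep ⟨H, a, b, 0, 0⟩).h1 = a + (if pvH1B l then 1 else 0) ∧
    (l.foldl pvStep ⟨H, a, b, 0, 0⟩).h2 = b + (if pvH2B l then 1 else 0) ∧
    (((l.foldl pvStep ⟨H, a, b, 0, 0⟩).st = 1 ∨ (l.foldl pvStep ⟨H, a, b, 0, 0⟩).st = 2 ∨
      (l.foldl pvStep ⟨H, a, b, 0, 0⟩).st = 3) ↔ pvHdrB l = true) := by
  have hsplit := (List.takeWhile_append_dropWhile (p := pvWs) (l := l)).symm
  have hfold : l.foldl pvStep ⟨H, a, b, 0, 0⟩ = (l.dropWhile pvWs).foldl pvStep ⟨H, a, b, 0, 0⟩ := by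
    conv_lhs => rw [hsplit]
    rw [List.foldl_append, L_ws0 _ _ (fun x hx => List.mem_takeWhile_imp hx) rfl]
  have hd_sub : ∀ x ∈ l.dropWhile pvWs, pvBrk x = false :=
    fun x hx => hl x ((List.dropWhile_sublist _).subset hx)
  rw [hfold]
  rcases hd : l.dropWhile pvWs with _ | ⟨c, r⟩
  · simp [pvH1B, pvH2B, pvHdrB, hd]
  · have hcw : pvWs c = false := dropWhile_head_false hd
    have hcb : pvBrk c = false := hd_sub c (by rw [hd]; exact List.mem_cons_self)
    have hcne := brk_ne c hcb
    have hcws := ws_ne c hcw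
    have hr_sub : ∀ x ∈ r, pvBrk x = false := fun x hx => by
      rw [hd] at hd_sub; exact hd_sub x (List.mem_cons_of_mem _ hx)
    by_cases hsh : c = '#'
    · subst hsh
      have hstep : pvStep ⟨H, a, b, 0, 0⟩ '#' = ⟨H, a, b, 1, 1⟩ := by simp [pvStep, hcne]
      rw [List.foldl_cons, hstep]
      rcases r with _ | ⟨c2, r2⟩
      · simp [pvH1B, pvH2B, pvHdrB, hd]
      · have hc2b : pvBrk c2 = false := hr_sub c2 List.mem_cons_self
        have hc2ne := brk_ne c2 hc2b
        have hr2_sub : ∀ x ∈ r2, pvBrk x = false := fun x hx => hr_sub x (List.mem_cons_of_mem _ hx)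
        by_cases h2s : c2 = '#'
        · subst h2s
          have hstep2 : pvStep ⟨H, a, b, 1, 1⟩ '#' = ⟨H, a, b, 1, 2⟩ := by simp [pvStep, hc2ne]
          rw [List.foldl_cons, hstep2]
          rcases r2 with _ | ⟨c3, r3⟩
          · simp [pvH1B, pvH2B, pvHdrB, hd]
          · have hc3b : pvBrk c3 = false := hr2_sub c3 List.mem_cons_self
            have hc3ne := brk_ne c3 hc3b
            have hr3_sub : ∀ x ∈ r3, pvBrk x = false := fun x hx => hr2_sub x (List.mem_cons_of_mem _ hx)
            by_cases h3s : c3 = '#'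
            · subst h3s
              have hstep3 : pvStep ⟨H, a, b, 1, 2⟩ '#' = ⟨H, a, b, 1, 3⟩ := by simp [pvStep, hc3ne]
              rw [List.foldl_cons, hstep3]
              obtain ⟨e1, e2, e3, e4⟩ := L_big r3 ⟨H, a, b, 1, 3⟩ hr3_sub rfl (by simp)
              rw [e1, e2, e3]
              simp [pvH1B, pvH2B, pvHdrB, hd]
              rcases e4 with h | h <;> simp [h]
            · by_cases h3sp : c3 = ' '
              · subst h3sp
                have hstep3 : pvStep ⟨H, a, b, 1, 2⟩ ' ' = ⟨H, a, b, 2, 2⟩ := by simp [pvStep, hc3ne]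
                rw [List.foldl_cons, hstep3, L_pending r3 _ hr3_sub rfl]
                by_cases hany : r3.any (fun c => !pvWs c) = true
                · simp [pvH1B, pvH2B, pvHdrB, hd, hany]
                · rw [if_neg hany]
                  simp only [Bool.not_eq_true] at hany
                  simp [pvH1B, pvH2B, pvHdrB, hd, hany]
              · have hstep3 : pvStep ⟨H, a, b, 1, 2⟩ c3 = ⟨H, a, b, 3, 2⟩ := by
                  simp [pvStep, hc3ne, h3s]
                  intro h; exact absurd h h3sp
                rw [List.foldl_cons, hstep3, L_inert r3 _ hr3_sub (by simp)]
                simp [pvH1B, pvH2B, pvHdrB, hd, h3s, h3sp]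
        · by_cases h2sp : c2 = ' '
          · subst h2sp
            have hstep2 : pvStep ⟨H, a, b, 1, 1⟩ ' ' = ⟨H, a, b, 2, 1⟩ := by simp [pvStep, hc2ne]
            rw [List.foldl_cons, hstep2, L_pending r2 _ hr2_sub rfl]
            by_cases hany : r2.any (fun c => !pvWs c) = true
            · simp [pvH1B, pvH2B, pvHdrB, hd, hany]
            · rw [if_neg hany]
              simp only [Bool.not_eq_true] at hany
              simp [pvH1B, pvH2B, pvHdrB, hd, hany]
          · have hstep2 : pvStep ⟨H, a, b, 1, 1⟩ c2 = ⟨H, a, b, 3, 1⟩ := by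
              simp [pvStep, hc2ne, h2s]
              intro h; exact absurd h h2sp
            rw [List.foldl_cons, hstep2, L_inert r2 _ hr2_sub (by simp)]
            simp [pvH1B, pvH2B, pvHdrB, hd, h2s, h2sp]
    · have hstep : pvStep ⟨H, a, b, 0, 0⟩ c = ⟨H, a, b, 4, 0⟩ := by
        simp [pvStep, hcne, hsh, hcws]
      rw [List.foldl_cons, hstep, L_inert r _ hr_sub (by simp)]
      simp [pvH1B, pvH2B, pvHdrB, hd, hsh]

lemma dropWhile_congr_mem {p q : Char → Bool} {l : List Char} (h : ∀ x ∈ l, p x = q x) :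
    l.dropWhile p = l.dropWhile q := by
  induction l with
  | nil => rfl
  | cons c t ih =>
    rw [List.dropWhile_cons, List.dropWhile_cons, h c List.mem_cons_self]
    split
    · exact ih (fun x hx => h x (List.mem_cons_of_mem _ hx))
    · rfl

lemma rstrip_eq_nil_iff (r : List Char) :
    PySem.Chars.rstrip r = [] ↔ ∀ c ∈ r, PySem.Chars.isspace c = true := by
  simp [PySem.Chars.rstrip, List.dropWhile_eq_nil_iff]

lemma rstrip_cons (x : Char) (r : List Char) :
    PySem.Chars.rstrip (x :: r) =
      if PySem.Chars.isspace x = true ∧ PySem.Chars.rstrip r = [] then []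
      else x :: PySem.Chars.rstrip r := by
  have hrev : (x :: r).reverse = r.reverse ++ [x] := by simp
  simp only [PySem.Chars.rstrip, hrev, List.dropWhile_append]
  by_cases hnil : List.dropWhile PySem.Chars.isspace r.reverse = []
  · rw [if_pos (by simp [hnil])]
    by_cases hx : PySem.Chars.isspace x = true
    · rw [if_pos ⟨hx, by simp [PySem.Chars.rstrip, hnil]⟩]
      simp [List.dropWhile_cons, hx]
    · rw [if_neg (by simp [hx])]
      simp [List.dropWhile_cons, hx, hnil]
  · rw [if_neg (by simp [hnil])]
    rw [if_neg (by simp [PySem.Chars.rstrip, hnil])]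
    simp

lemma L_sphead (r : List Char) (hb : ∀ c ∈ r, pvDomChar c = true ∧ pvBrk c = false) :
    PySem.Chars.startswith (PySem.Chars.rstrip r) [' '] =
      (r.head? == some ' ' && (r.drop 1).any (fun c => !pvWs c)) := by
  rcases r with _ | ⟨x, r'⟩
  · simp [PySem.Chars.rstrip, PySem.Chars.startswith]
  · have hx := hb x List.mem_cons_self
    have hr' : ∀ c ∈ r', pvDomChar c = true ∧ pvBrk c = false :=
      fun c hc => hb c (List.mem_cons_of_mem _ hc)
    have hrs_nil : (PySem.Chars.rstrip r' = []) ↔ (r'.any (fun c => !pvWs c) = false) := by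
      rw [rstrip_eq_nil_iff]
      simp only [List.any_eq_false, Bool.not_eq_true']
      constructor
      · intro h c hc
        have h2 := h c hc
        rw [dom_isspace c (hr' c hc).1 (hr' c hc).2] at h2
        simp [h2]
      · intro h c hc
        have h2 := h c hc
        rw [dom_isspace c (hr' c hc).1 (hr' c hc).2]
        simpa using h2
    rw [rstrip_cons]
    by_cases hxs : PySem.Chars.isspace x = true
    · by_cases hnil : PySem.Chars.rstrip r' = []
      · rw [if_pos ⟨hxs, hnil⟩]
        rw [hrs_nil] at hnil
        simp [PySem.Chars.startswith, hnil]
      · rw [if_neg (by simp [hnil])]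
        by_cases hsp : x = ' '
        · subst hsp
          have : r'.any (fun c => !pvWs c) = true := by
            rcases Bool.eq_false_or_eq_true (r'.any (fun c => !pvWs c)) with h | h
            · exact h
            · exact absurd (hrs_nil.mpr h) hnil
          simp [PySem.Chars.startswith, List.isPrefixOf, this]
        · simp only [PySem.Chars.startswith, List.isPrefixOf, List.head?_cons, List.drop_one, List.tail_cons]
          rw [Bool.eq_iff_iff]
          simp [hsp]
          exact fun h => hsp h.symm
    · have hsp : x ≠ ' ' := by rintro rfl; exact hxs (by decide)
      rw [if_neg (by simp [hxs])]
      simp only [PySem.Chars.startswith, List.isPrefixOf, List.head?_cons, List.drop_one, List.tail_cons]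
      rw [Bool.eq_iff_iff]
      simp [hsp]
      exact fun h => hsp h.symm

lemma L_predH (l : List Char) (hb : ∀ c ∈ l, pvDomChar c = true ∧ pvBrk c = false) :
    pvAH l = pvHdrB l := by
  have hls : PySem.Chars.lstrip l = l.dropWhile pvWs :=
    dropWhile_congr_mem (fun x hx => dom_isspace x (hb x hx).1 (hb x hx).2)
  have hd_sub : ∀ x ∈ l.dropWhile pvWs, pvDomChar x = true ∧ pvBrk x = false :=
    fun x hx => hb x ((List.dropWhile_sublist _).subset hx)
  unfold pvAH pvHdrB PySem.Chars.strip
  rw [hls]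
  rcases hd : l.dropWhile pvWs with _ | ⟨c, r⟩
  · simp [PySem.Chars.rstrip, PySem.Chars.startswith]
  · have hcw : pvWs c = false := dropWhile_head_false hd
    have hcd := hd_sub c (by rw [hd]; exact List.mem_cons_self)
    have hcs : PySem.Chars.isspace c = false := by rw [dom_isspace c hcd.1 hcd.2]; exact hcw
    rw [rstrip_cons, if_neg (by simp [hcs])]
    simp [PySem.Chars.startswith, List.isPrefixOf]
    exact eq_comm

lemma L_pred1 (l : List Char) (hb : ∀ c ∈ l, pvDomChar c = true ∧ pvBrk c = false) :
    pvA1 l = pvH1B l := by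
  have hls : PySem.Chars.lstrip l = l.dropWhile pvWs :=
    dropWhile_congr_mem (fun x hx => dom_isspace x (hb x hx).1 (hb x hx).2)
  have hd_sub : ∀ x ∈ l.dropWhile pvWs, pvDomChar x = true ∧ pvBrk x = false :=
    fun x hx => hb x ((List.dropWhile_sublist _).subset hx)
  unfold pvA1 pvH1B PySem.Chars.strip
  rw [hls]
  rcases hd : l.dropWhile pvWs with _ | ⟨c, r⟩
  · simp [PySem.Chars.rstrip, PySem.Chars.startswith]
  · have hcw : pvWs c = false := dropWhile_head_false hd
    have hcd := hd_sub c (by rw [hd]; exact List.mem_cons_self)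
    have hcs : PySem.Chars.isspace c = false := by rw [dom_isspace c hcd.1 hcd.2]; exact hcw
    have hr_sub : ∀ x ∈ r, pvDomChar x = true ∧ pvBrk x = false := fun x hx => by
      rw [hd] at hd_sub; exact hd_sub x (List.mem_cons_of_mem _ hx)
    rw [rstrip_cons, if_neg (by simp [hcs])]
    by_cases hc : c = '#'
    · subst hc
      have := L_sphead r hr_sub
      simp only [PySem.Chars.startswith] at this ⊢
      simp [List.isPrefixOf, this, List.drop_one]
      rcases r with _ | ⟨y, r'⟩ <;> simp
    · have e1 : ('#' == c) = false := beq_eq_false_iff_ne.mpr (fun h => hc h.symm)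
      have e2 : (c == '#') = false := beq_eq_false_iff_ne.mpr hc
      simp [PySem.Chars.startswith, List.isPrefixOf, e1, e2]

lemma L_pred2 (l : List Char) (hb : ∀ c ∈ l, pvDomChar c = true ∧ pvBrk c = false) :
    pvA2 l = pvH2B l := by
  have hls : PySem.Chars.lstrip l = l.dropWhile pvWs :=
    dropWhile_congr_mem (fun x hx => dom_isspace x (hb x hx).1 (hb x hx).2)
  have hd_sub : ∀ x ∈ l.dropWhile pvWs, pvDomChar x = true ∧ pvBrk x = false :=
    fun x hx => hb x ((List.dropWhile_sublist _).subset hx)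
  unfold pvA2 pvH2B PySem.Chars.strip
  rw [hls]
  rcases hd : l.dropWhile pvWs with _ | ⟨c, r⟩
  · simp [PySem.Chars.rstrip, PySem.Chars.startswith]
  · have hcw : pvWs c = false := dropWhile_head_false hd
    have hcd := hd_sub c (by rw [hd]; exact List.mem_cons_self)
    have hcs : PySem.Chars.isspace c = false := by rw [dom_isspace c hcd.1 hcd.2]; exact hcw
    have hr_sub : ∀ x ∈ r, pvDomChar x = true ∧ pvBrk x = false := fun x hx => by
      rw [hd] at hd_sub; exact hd_sub x (List.mem_cons_of_mem _ hx)
    rw [rstrip_cons, if_neg (by simp [hcs])]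
    by_cases hc : c = '#'
    · subst hc
      rcases r with _ | ⟨y, r'⟩
      · simp [PySem.Chars.rstrip, PySem.Chars.startswith, List.isPrefixOf]
      · have hyd := hr_sub y List.mem_cons_self
        have hr'_sub : ∀ x ∈ r', pvDomChar x = true ∧ pvBrk x = false :=
          fun x hx => hr_sub x (List.mem_cons_of_mem _ hx)
        by_cases hys : PySem.Chars.isspace y = true
        · have hyne : y ≠ '#' := by rintro rfl; exact absurd hys (by decide)
          rw [rstrip_cons]
          by_cases hnil' : PySem.Chars.rstrip r' = []
          · rw [if_pos ⟨hys, hnil'⟩]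
            have e1 : ('#' == y) = false := beq_eq_false_iff_ne.mpr (fun h => hyne h.symm)
            have e2 : (y == '#') = false := beq_eq_false_iff_ne.mpr hyne
            simp [PySem.Chars.startswith, List.isPrefixOf, e1, e2]
          · rw [if_neg (by simp [hnil'])]
            have e1 : ('#' == y) = false := beq_eq_false_iff_ne.mpr (fun h => hyne h.symm)
            have e2 : (y == '#') = false := beq_eq_false_iff_ne.mpr hyne
            simp [PySem.Chars.startswith, List.isPrefixOf, e1, e2]
        · rw [rstrip_cons, if_neg (by simp [hys])]
          by_cases hy : y = '#'
          · subst hy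
            have := L_sphead r' hr'_sub
            simp only [PySem.Chars.startswith] at this ⊢
            simp [List.isPrefixOf, this, List.drop_one]
            rcases r' with _ | ⟨z, r''⟩ <;> simp
          · have e1 : ('#' == y) = false := beq_eq_false_iff_ne.mpr (fun h => hy h.symm)
            have e2 : (y == '#') = false := beq_eq_false_iff_ne.mpr hy
            simp [PySem.Chars.startswith, List.isPrefixOf, e1, e2]
    · have e1 : ('#' == c) = false := beq_eq_false_iff_ne.mpr (fun h => hc h.symm)
      have e2 : (c == '#') = false := beq_eq_false_iff_ne.mpr hc
      simp [PySem.Chars.startswith, List.isPrefixOf, e1, e2]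

def pvFinalH (m : MSt) : Int := if m.st = 1 ∨ m.st = 2 ∨ m.st = 3 then m.headers + 1 else m.headers

lemma step_brk (m : MSt) (c : Char) (hc : c = '\n' ∨ c = '\r') :
    pvStep m c = ⟨pvFinalH m, m.h1, m.h2, 0, 0⟩ := by
  by_cases h : m.st = 1 ∨ m.st = 2 ∨ m.st = 3
  · simp [pvStep, hc, h, pvFinalH]
  · simp [pvStep, hc, h, pvFinalH]

lemma finalH_line (t : List Char) (ht : ∀ c ∈ t, pvBrk c = false) (htd : ∀ c ∈ t, pvDomChar c = true)
    (H a b : Int) :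
    pvFinalH (t.foldl pvStep ⟨H, a, b, 0, 0⟩) = H + (if pvAH t then 1 else 0) ∧
    (t.foldl pvStep ⟨H, a, b, 0, 0⟩).h1 = a + (if pvA1 t then 1 else 0) ∧
    (t.foldl pvStep ⟨H, a, b, 0, 0⟩).h2 = b + (if pvA2 t then 1 else 0) := by
  obtain ⟨e1, e2, e3, e4⟩ := L_line t ht H a b
  have hb : ∀ c ∈ t, pvDomChar c = true ∧ pvBrk c = false := fun c hc => ⟨htd c hc, ht c hc⟩
  rw [L_predH t hb, L_pred1 t hb, L_pred2 t hb]
  refine ⟨?_, by rw [e2], by rw [e3]⟩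
  unfold pvFinalH
  by_cases hh : pvHdrB t = true
  · rw [if_pos (e4.mpr hh), e1, if_pos hh]
  · rw [if_neg (fun hc => hh (e4.mp hc)), e1, if_neg hh]; ring

lemma L_main (n : Nat) (rest : List Char) (hn : rest.length ≤ n)
    (hdom : ∀ c ∈ rest, pvDomChar c = true) (H a b : Int) :
    pvFinalH (rest.foldl pvStep ⟨H, a, b, 0, 0⟩) =
      H + ((PySem.Chars.splitlines rest).countP pvAH : Int) ∧
    (rest.foldl pvStep ⟨H, a, b, 0, 0⟩).h1 = a + ((PySem.Chars.splitlines rest).countP pvA1 : Int) ∧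
    (rest.foldl pvStep ⟨H, a, b, 0, 0⟩).h2 = b + ((PySem.Chars.splitlines rest).countP pvA2 : Int) := by
  induction n generalizing rest H a b with
  | zero =>
    have : rest = [] := List.length_eq_zero_iff.mp (Nat.le_zero.mp hn)
    subst this
    simp [PySem.Chars.splitlines, PySem.Chars.splitlines.go, pvFinalH]
  | succ n ih =>
    have hsplit := (List.takeWhile_append_dropWhile (p := fun c => !pvBrk c) (l := rest)).symm
    set t := rest.takeWhile (fun c => !pvBrk c) with htdef
    set d := rest.dropWhile (fun c => !pvBrk c) with hddef
    have htb : ∀ c ∈ t, pvBrk c = false := fun c hc => by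
      have := List.mem_takeWhile_imp hc; simpa using this
    have htd : ∀ c ∈ t, pvDomChar c = true := fun c hc =>
      hdom c (by rw [hsplit]; exact List.mem_append_left _ hc)
    have hdd : ∀ c ∈ d, pvDomChar c = true := fun c hc =>
      hdom c (by rw [hsplit]; exact List.mem_append_right _ hc)
    have htIsB : ∀ c ∈ t, pvIsB c = false := fun c hc => by
      rw [dom_isB c (htd c hc)]; exact htb c hc
    have hsl : PySem.Chars.splitlines rest = PySem.Chars.splitlines.go pvIsB d t.reverse [] := by
      rw [splitlines_eq_go]
      conv_lhs => rw [hsplit]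
      rw [go_consume t htIsB d [] []]
      simp
    have hfold : rest.foldl pvStep ⟨H, a, b, 0, 0⟩ = d.foldl pvStep (t.foldl pvStep ⟨H, a, b, 0, 0⟩) := by
      conv_lhs => rw [hsplit]
      rw [List.foldl_append]
    obtain ⟨f1, f2, f3⟩ := finalH_line t htb htd H a b
    rcases hd : d with _ | ⟨c, d'⟩
    · rw [hfold, hd, hsl, hd, go_nil]
      rcases ht : t with _ | ⟨x, t'⟩
      · simp [pvFinalH]
      · rw [← ht]
        have hne : t ≠ [] := by rw [ht]; exact List.cons_ne_nil _ _
        rw [if_neg (by simpa using (by simp [hne] : ¬ t.reverse = []))]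
        simp only [List.foldl_nil, List.reverse_reverse, List.reverse_nil]
        refine ⟨?_, ?_, ?_⟩
        · rw [f1]; simp [List.countP_cons]
          try (split <;> simp)
          try ring
        · rw [f2]; simp [List.countP_cons]
          try (split <;> simp)
          try ring
        · rw [f3]; simp [List.countP_cons]
          try (split <;> simp)
          try ring
    · have hcb : pvBrk c = true := by
        have hdw : rest.dropWhile (fun c => !pvBrk c) = c :: d' := by rw [← hddef, hd]
        have := dropWhile_head_false hdw
        simpa using this
      have hcd : pvDomChar c = true := hdd c (by rw [hd]; exact List.mem_cons_self)
      have hcor : c = '\n' ∨ c = '\r' := by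
        simp [pvBrk] at hcb; tauto
      have hd'dom : ∀ x ∈ d', pvDomChar x = true := fun x hx =>
        hdd x (by rw [hd]; exact List.mem_cons_of_mem _ hx)
      have hlen : rest.length = t.length + 1 + d'.length := by
        rw [hsplit, hd]; simp; omega
      have hstep1 : (c :: d').foldl pvStep (t.foldl pvStep ⟨H, a, b, 0, 0⟩) =
          d'.foldl pvStep ⟨pvFinalH (t.foldl pvStep ⟨H, a, b, 0, 0⟩),
            (t.foldl pvStep ⟨H, a, b, 0, 0⟩).h1, (t.foldl pvStep ⟨H, a, b, 0, 0⟩).h2, 0, 0⟩ := by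
        rw [List.foldl_cons, step_brk _ c hcor]
      have hstep0 : ∀ (X y z : Int), pvStep ⟨X, y, z, 0, 0⟩ '\n' = ⟨X, y, z, 0, 0⟩ := by
        intro X y z
        rw [step_brk _ '\n' (Or.inl rfl)]
        simp [pvFinalH]
      have finish : ∀ (rest2 : List Char), rest2.length ≤ n → (∀ x ∈ rest2, pvDomChar x = true) →
          PySem.Chars.splitlines rest = t :: PySem.Chars.splitlines rest2 →
          rest.foldl pvStep ⟨H, a, b, 0, 0⟩ =
            rest2.foldl pvStep ⟨pvFinalH (t.foldl pvStep ⟨H, a, b, 0, 0⟩),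
              (t.foldl pvStep ⟨H, a, b, 0, 0⟩).h1, (t.foldl pvStep ⟨H, a, b, 0, 0⟩).h2, 0, 0⟩ →
          pvFinalH (rest.foldl pvStep ⟨H, a, b, 0, 0⟩) =
            H + ((PySem.Chars.splitlines rest).countP pvAH : Int) ∧
          (rest.foldl pvStep ⟨H, a, b, 0, 0⟩).h1 =
            a + ((PySem.Chars.splitlines rest).countP pvA1 : Int) ∧
          (rest.foldl pvStep ⟨H, a, b, 0, 0⟩).h2 =
            b + ((PySem.Chars.splitlines rest).countP pvA2 : Int) := by
        intro rest2 hlen2 hdom2 hsl2 hm2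
        obtain ⟨g1, g2, g3⟩ := ih rest2 hlen2 hdom2
          (pvFinalH (t.foldl pvStep ⟨H, a, b, 0, 0⟩))
          ((t.foldl pvStep ⟨H, a, b, 0, 0⟩).h1) ((t.foldl pvStep ⟨H, a, b, 0, 0⟩).h2)
        rw [hsl2, hm2]
        refine ⟨?_, ?_, ?_⟩
        · rw [g1, f1, List.countP_cons]; push_cast; split <;> ring
        · rw [g2, f2, List.countP_cons]; push_cast; split <;> ring
        · rw [g3, f3, List.countP_cons]; push_cast; split <;> ring
      rcases hcor with hcn | hcr
      · subst hcn
        refine finish d' (by omega) hd'dom ?_ ?_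
        · rw [hsl, hd, go_n, splitlines_eq_go d']
          rw [go_acc d'.length d' le_rfl [] [t.reverse.reverse]]
          simp
        · rw [hfold, hd, hstep1]
      · subst hcr
        rcases hd2 : d' with _ | ⟨c2, d''⟩
        · refine finish [] (by simp) (by simp) ?_ ?_
          · rw [hsl, hd, hd2, go_r _ _ _ (by intro r' h; cases h), splitlines_eq_go []]
            rw [go_acc 0 [] le_rfl [] [t.reverse.reverse]]
            simp
          · rw [hfold, hd, hstep1, hd2]
        · by_cases h2n : c2 = '\n'
          · subst h2n
            refine finish d'' (by rw [hd2] at hlen; simp at hlen; omega)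
              (fun x hx => hd'dom x (by rw [hd2]; exact List.mem_cons_of_mem _ hx)) ?_ ?_
            · rw [hsl, hd, hd2, go_rn, splitlines_eq_go d'']
              rw [go_acc d''.length d'' le_rfl [] [t.reverse.reverse]]
              simp
            · rw [hfold, hd, hstep1, hd2, List.foldl_cons, hstep0]
          · refine finish (c2 :: d'') (by rw [hd2] at hlen; omega)
              (fun x hx => hd'dom x (by rw [hd2]; exact hx)) ?_ ?_
            · rw [hsl, hd, hd2, go_r _ _ _ (by intro r' h; injection h with h1 _; exact h2n h1),
                splitlines_eq_go (c2 :: d'')]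
              rw [go_acc (c2 :: d'').length _ le_rfl [] [t.reverse.reverse]]
              simp
            · rw [hfold, hd, hstep1, hd2]

lemma sw_mono (s p q : String) (hpq : p.toList <+: q.toList)
    (hq : PySem.Str.startswith s q = true) : PySem.Str.startswith s p = true := by
  rw [PySem.Str.startswith_eq] at hq ⊢
  exact (PySem.Chars.startswith_iff _ _).mpr (hpq.trans ((PySem.Chars.startswith_iff _ _).mp hq))

lemma filter_sub (ls : List String) (sub : String)
    (hsub : sub.toList.head? = some '#') :
    (ls.filter (fun x => PySem.Str.startswith (PySem.Str.strip x) "#")).filter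
      (fun x => PySem.Str.startswith (PySem.Str.strip x) sub) =
    ls.filter (fun x => PySem.Str.startswith (PySem.Str.strip x) sub) := by
  rw [List.filter_filter]
  apply List.filter_congr
  intro x _
  by_cases h : PySem.Str.startswith (PySem.Str.strip x) sub = true
  · have h' : PySem.Str.startswith (PySem.Str.strip x) "#" = true := by
      apply sw_mono _ _ sub _ h
      rcases hs : sub.toList with _ | ⟨c, r⟩
      · rw [hs] at hsub; cases hsub
      · rw [hs] at hsub; injection hsub with h1; subst h1; exact ⟨r, rfl⟩
    rw [h, h']
    rfl
  · rw [Bool.not_eq_true] at h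
    rw [h]
    simp

lemma countP_str (text : String) (sub : List Char)
    (p : String → Bool) (q : List Char → Bool)
    (hpq : ∀ s, p s = q s.toList) :
    ((PySem.Str.splitlines text).filter p).length = (PySem.Chars.splitlines text.toList).countP q := by
  rw [← List.countP_eq_length_filter]
  rw [← PySem.Str.splitlines_map_toList, List.countP_map]
  apply List.countP_congr
  intro s _
  rw [hpq s]
  simp

-- ===== VERDICT (by name: the statement is the Claim_ definition above) =====
theorem extract_markdown_metadata_py_spec : Claim_equal_extract_markdown_metadata_py := by
  intro text hdom
  have hdom' : ∀ c ∈ text.toList, pvDomChar c = true := by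
    simpa [Dom_extract_markdown_metadata_py, pvDomStr, List.all_eq_true] using hdom
  obtain ⟨m1, m2, m3⟩ := L_main text.toList.length text.toList le_rfl hdom' 0 0 0
  simp only [extract_markdown_metadata_py, extract_markdown_metadata_py_alt]
  rw [filter_sub _ "# " rfl, filter_sub _ "## " rfl]
  have cH := countP_str text ['#'] (fun line => PySem.Str.startswith (PySem.Str.strip line) "#") pvAH
    (fun s => by simp [pvAH])
  have c1 := countP_str text ['#',' '] (fun line => PySem.Str.startswith (PySem.Str.strip line) "# ") pvA1
    (fun s => by simp [pvA1])
  have c2 := countP_str text ['#','#',' '] (fun line => PySem.Str.startswith (PySem.Str.strip line) "## ") pvA2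
    (fun s => by simp [pvA2])
  rw [cH, c1, c2]
  have e1 : ((PySem.Chars.splitlines text.toList).countP pvAH : Int) =
      pvFinalH (text.toList.foldl pvStep ⟨0, 0, 0, 0, 0⟩) := by rw [m1]; ring
  have e2 : ((PySem.Chars.splitlines text.toList).countP pvA1 : Int) =
      (text.toList.foldl pvStep ⟨0, 0, 0, 0, 0⟩).h1 := by rw [m2]; ring
  have e3 : ((PySem.Chars.splitlines text.toList).countP pvA2 : Int) =
      (text.toList.foldl pvStep ⟨0, 0, 0, 0, 0⟩).h2 := by rw [m3]; ring
  rw [e1, e2, e3]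
  rfl
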